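-- pv_equiv track=rewrite | github.com/JamesShirk/compPhys | 2/assignment1/PRNG.py | psuedoRanSum
-- ===== SOURCE A (Python) =====
-- def psuedoRanSum(seed, m, n, p):
--     x0 = seed
--     x1 = seed % p
--     x2 = 0
--     values = []
--     for _ in range(0, n):
--         x2 = (x1 + x0) % m
--         x1 = x2
--         x0 = x1
--         values.append(x2)
--     return values
-- ===== SOURCE B (Python) =====
-- def psuedoRanSum(seed, m, n, p):
--     base = seed % p + seed
--     return [(base * pow(2, k, m)) % m for k in range(n)]
-- ===== Notes on version B (the rewrite author's own statement) =====
-- stated objective: alternative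
-- what changed: The three-variable additive recurrence is replaced by the closed form v_k = (base * pow(2, k, m)) % m with base = seed % p + seed, computed independently per index with no loop state.
import Mathlib
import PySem

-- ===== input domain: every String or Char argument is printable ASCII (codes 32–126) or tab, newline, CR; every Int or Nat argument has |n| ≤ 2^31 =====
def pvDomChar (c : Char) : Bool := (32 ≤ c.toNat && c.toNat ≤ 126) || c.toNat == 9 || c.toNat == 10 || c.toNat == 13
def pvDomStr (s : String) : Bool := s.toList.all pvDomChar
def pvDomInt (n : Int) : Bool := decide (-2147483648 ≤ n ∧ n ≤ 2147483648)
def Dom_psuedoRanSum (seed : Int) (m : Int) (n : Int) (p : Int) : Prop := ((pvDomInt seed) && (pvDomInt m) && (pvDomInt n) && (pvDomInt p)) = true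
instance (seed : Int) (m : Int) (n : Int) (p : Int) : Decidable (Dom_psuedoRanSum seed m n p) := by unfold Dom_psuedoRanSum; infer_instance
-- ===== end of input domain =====

-- B replaces A's three-variable additive recurrence by the closed form (base * pow(2, k, m)) % m, base = seed % p + seed (objective: simpler).


-- ===== PORT A =====
-- loop body of A (x2 = (x1+x0) % m; x1 = x2; x0 = x1; values.append(x2)), state (x0, x1, values)
def pvStepA (m : Int) (s : Int × Int × List Int) (_ : Int) : Int × Int × List Int :=
  let x2 := PySem.Int.mod (s.2.1 + s.1) m
  (x2, x2, s.2.2 ++ [x2])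

def psuedoRanSum (seed : Int) (m : Int) (n : Int) (p : Int) : List Int :=
  let x0 := seed
  let x1 := PySem.Int.mod seed p
  let st := (PySem.List.pyRange 0 n 1).foldl (pvStepA m) (x0, x1, ([] : List Int))
  st.2.2

-- ===== PORT B =====
def psuedoRanSum_alt (seed : Int) (m : Int) (n : Int) (p : Int) : List Int :=
  let base := PySem.Int.mod seed p + seed
  (PySem.List.pyRange 0 n 1).map (fun k => PySem.Int.mod (base * PySem.Int.powMod 2 k.toNat m) m)

-- ===== PRECONDITION & SPEC =====
-- p = 0 makes 'seed % p' raise ZeroDivisionError; m = 0 with n > 0 makes '% m' in the loop raise ZeroDivisionError.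
def Pre_psuedoRanSum (seed : Int) (m : Int) (n : Int) (p : Int) : Prop := p ≠ 0 ∧ (m ≠ 0 ∨ n ≤ 0)
instance (seed : Int) (m : Int) (n : Int) (p : Int) : Decidable (Pre_psuedoRanSum seed m n p) := by unfold Pre_psuedoRanSum; infer_instance
def pvWitness_psuedoRanSum : Int × Int × Int × Int := (7, 10, 5, 3)
def Spec_psuedoRanSum (seed : Int) (m : Int) (n : Int) (p : Int) (out : List Int) : Prop := out = psuedoRanSum_alt seed m n p
instance (seed : Int) (m : Int) (n : Int) (p : Int) (out : List Int) : Decidable (Spec_psuedoRanSum seed m n p out) := by unfold Spec_psuedoRanSum; infer_instance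

-- ===== CLAIM (what is proved, stated in full; the proofs are below) =====
def Claim_equal_psuedoRanSum : Prop := ∀ (seed : Int) (m : Int) (n : Int) (p : Int), Dom_psuedoRanSum seed m n p → Pre_psuedoRanSum seed m n p → Spec_psuedoRanSum seed m n p (psuedoRanSum seed m n p)

-- ===== LEMMAS AND PROOFS =====

-- Python % absorbs an inner Python % of the same modulus (true for every m, including 0).
theorem pv_fmod_congr (x y m : Int) (h : x % m = y % m) : PySem.Int.mod x m = PySem.Int.mod y m := by
  have hd : (m ∣ x) ↔ (m ∣ y) := by
    rw [Int.dvd_iff_emod_eq_zero, Int.dvd_iff_emod_eq_zero, h]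
  show Int.fmod x m = Int.fmod y m
  rw [Int.fmod_eq_emod, Int.fmod_eq_emod, h]
  by_cases h0 : 0 ≤ m
  · simp [h0]
  · simp [h0, hd]

theorem pv_mod_emod (x m : Int) : (PySem.Int.mod x m) % m = x % m := by
  show (Int.fmod x m) % m = x % m
  rw [Int.fmod_eq_emod]
  split_ifs with h
  · simp [Int.emod_emod_of_dvd]
  · simp [Int.emod_emod_of_dvd]

-- the value at index j of B's closed form
def pvG (base m : Int) (j : Nat) : Int := PySem.Int.mod (base * 2 ^ j) m

theorem pvG_step (base m : Int) (j : Nat) :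
    PySem.Int.mod (pvG base m j + pvG base m j) m = pvG base m (j + 1) := by
  apply pv_fmod_congr
  have h := pv_mod_emod (base * 2 ^ j) m
  calc (pvG base m j + pvG base m j) % m
      = (pvG base m j % m + pvG base m j % m) % m := by rw [Int.add_emod]
    _ = ((base * 2 ^ j) % m + (base * 2 ^ j) % m) % m := by rw [pvG, h]
    _ = (base * 2 ^ j + base * 2 ^ j) % m := by rw [← Int.add_emod]
    _ = (base * 2 ^ (j + 1)) % m := by ring_nf

-- B's per-index value collapses to pvG: pow(2, j, m) agrees with 2^j modulo m
theorem pvGB_eq (base m : Int) (j : Nat) :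
    PySem.Int.mod (base * PySem.Int.powMod 2 j m) m = pvG base m j := by
  have hp : PySem.Int.powMod 2 j m = PySem.Int.mod (2 ^ j) m := by simp [PySem.Int.powMod]
  rw [hp]
  apply pv_fmod_congr
  rw [Int.mul_emod, pv_mod_emod, ← Int.mul_emod]

-- loop invariant for A's fold: from a state (v, v, acc) with v = pvG base m j the fold appends pvG at j+1, j+2, …
theorem pv_loop (base m : Int) (l : List Int) : ∀ (j : Nat) (acc : List Int),
    l.foldl (pvStepA m) (pvG base m j, pvG base m j, acc)
    = (pvG base m (j + l.length), pvG base m (j + l.length),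
       acc ++ (List.range l.length).map (fun i => pvG base m (j + 1 + i))) := by
  induction l with
  | nil => intro j acc; simp
  | cons a t ih =>
    intro j acc
    rw [List.foldl_cons]
    have hs : pvStepA m (pvG base m j, pvG base m j, acc) a
        = (pvG base m (j + 1), pvG base m (j + 1), acc ++ [pvG base m (j + 1)]) := by
      simp [pvStepA, pvG_step]
    rw [hs, ih (j + 1) (acc ++ [pvG base m (j + 1)])]
    have hfun : (fun i => pvG base m (j + 1 + 1 + i)) = ((fun i => pvG base m (j + 1 + i)) ∘ Nat.succ) := by
      funext i; simp only [Function.comp]; congr 1; omega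
    refine Prod.ext ?_ (Prod.ext ?_ ?_)
    · show pvG base m (j + 1 + t.length) = pvG base m (j + (a :: t).length)
      congr 1; simp; omega
    · show pvG base m (j + 1 + t.length) = pvG base m (j + (a :: t).length)
      congr 1; simp; omega
    · show (acc ++ [pvG base m (j + 1)]) ++ (List.range t.length).map (fun i => pvG base m (j + 1 + 1 + i))
          = acc ++ (List.range (a :: t).length).map (fun i => pvG base m (j + 1 + i))
      simp only [List.length_cons, List.range_succ_eq_map, List.map_cons, List.map_map, hfun,
        List.append_assoc, List.singleton_append, Nat.add_zero]

-- ===== VERDICT (by name: the statement is the Claim_ definition above) =====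
theorem psuedoRanSum_spec : Claim_equal_psuedoRanSum := by
  intro seed m n p _ _
  unfold Spec_psuedoRanSum psuedoRanSum psuedoRanSum_alt
  by_cases hn : n ≤ 0
  · have : PySem.List.pyRange 0 n 1 = [] := by
      simp [PySem.List.pyRange]; omega
    simp [this]
  · push Not at hn
    obtain ⟨K, hK⟩ : ∃ K : Nat, n = ((K + 1 : Nat) : Int) := ⟨(n - 1).toNat, by omega⟩
    have hr : PySem.List.pyRange 0 n 1 = (List.range (K + 1)).map (fun k : Nat => (k : Int)) := by
      rw [hK]; exact PySem.List.pyRange_zero_natCast (K + 1)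
    rw [hr]
    simp only [List.range_succ_eq_map, List.map_cons, List.map_map, List.foldl_cons]
    have hstep0 : pvStepA m (seed, PySem.Int.mod seed p, ([] : List Int)) ((0 : Nat) : Int)
        = (pvG (PySem.Int.mod seed p + seed) m 0, pvG (PySem.Int.mod seed p + seed) m 0,
           [pvG (PySem.Int.mod seed p + seed) m 0]) := by
      simp [pvStepA, pvG]
    rw [hstep0, pv_loop (PySem.Int.mod seed p + seed) m _ 0 [pvG (PySem.Int.mod seed p + seed) m 0]]
    simp only [List.length_map, List.length_range]
    show [pvG (PySem.Int.mod seed p + seed) m 0] ++ (List.range K).map (fun i => pvG (PySem.Int.mod seed p + seed) m (0 + 1 + i))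
        = _ :: (List.range K).map _
    simp only [List.singleton_append, List.cons.injEq]
    constructor
    · exact (pvGB_eq (PySem.Int.mod seed p + seed) m 0).symm
    · refine List.map_congr_left ?_
      intro i _
      have h01 : 0 + 1 + i = i + 1 := by omega
      have hi : ((Nat.succ i : Int)).toNat = i + 1 := by omega
      simp only [Function.comp, hi, pvGB_eq, h01]
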